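-- pv_equiv track=rewrite | github.com/SangHui48/algo | 기타/올바른 괄호만들기.py | solution
-- ===== SOURCE A (Python) =====
-- from itertools import combinations
--
-- def check(s):
--     count = 0
--     for i in range(len(s)):
--         if s[i] == '(':
--             count += 1
--         else:
--             count -= 1
--
--         if count < 0:
--             return False
--     if count != 0:
--         return False
--     else:
--         return True
--
-- def solution(s):
--     for i in range(len(s), 1, -1):
--         comb = set(list(combinations(list(s), i)))
--
--         count = 0
--         for c in comb:
--             if check(c):
--                 count += 1
--
--         if count != 0:
--             return count
--     return 0
-- ===== SOURCE B (Python) =====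
-- from functools import lru_cache
--
-- def solution(s):
--     n = len(s)
--
--     @lru_cache(maxsize=None)
--     def f(i, l, b):
--         # number of DISTINCT length-l subsequences of s[i:] that, started at
--         # balance b ('(' = +1, anything else = -1), never go negative and end at 0
--         if l == 0:
--             return 1 if b == 0 else 0
--         total = 0
--         seen = set()
--         for j in range(i, n):
--             c = s[j]
--             if c in seen:
--                 continue
--             seen.add(c)
--             nb = b + 1 if c == '(' else b - 1
--             if nb >= 0:
--                 total += f(j + 1, l - 1, nb)
--         return total
--
--     for l in range(n, 1, -1):
--         cnt = f(0, l, 0)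
--         if cnt:
--             return cnt
--     return 0
-- ===== Notes on version B (the rewrite author's own statement) =====
-- stated objective: faster
-- what changed: A enumerates all C(n,i) character combinations for each length i and filters the deduplicated set by a balance check; B counts distinct balanced subsequences directly with a memoized DP over (position, remaining length, balance) using a first-occurrence scan, never materializing the subsequences.
import Mathlib
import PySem

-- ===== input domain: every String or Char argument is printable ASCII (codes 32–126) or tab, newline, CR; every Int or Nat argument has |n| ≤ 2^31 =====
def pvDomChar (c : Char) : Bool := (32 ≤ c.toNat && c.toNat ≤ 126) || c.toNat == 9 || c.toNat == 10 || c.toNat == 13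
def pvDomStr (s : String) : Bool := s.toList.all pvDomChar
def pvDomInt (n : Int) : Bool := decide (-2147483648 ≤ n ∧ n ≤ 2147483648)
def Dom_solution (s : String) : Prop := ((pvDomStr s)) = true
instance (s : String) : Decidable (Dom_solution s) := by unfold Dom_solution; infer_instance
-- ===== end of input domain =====

-- B replaces A's exponential enumeration of all character combinations per length with a
-- memoized DP over (suffix, remaining length, balance) that counts distinct balanced
-- subsequences via a first-occurrence scan (objective: faster, asymptotic).

-- ===== PORT A =====
-- check(s): running count, '(' is +1 anything else -1, fail on negative, end at 0
def checkAux (count : Int) : List Char → Bool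
  | [] => count == 0
  | c :: rest =>
    let count' := if c = '(' then count + 1 else count - 1
    if count' < 0 then false else checkAux count' rest

def check (t : List Char) : Bool := checkAux 0 t

-- 'count = 0; for c in comb: if check(c): count += 1' (order-independent, so Set iteration is safe)
def countComb : List (List Char) → Int → Int
  | [], count => count
  | c :: rest, count => countComb rest (if check c then count + 1 else count)

-- 'for i in range(len(s), 1, -1): comb = set(combinations(list(s), i)); … ' ; itertools.combinations
-- is ported as List.sublistsLen (same tuples; only the pre-dedup order differs, which set() erases)
def solLoopA (u : List Char) : List Int → Int
  | [] => 0
  | i :: rest =>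
    let comb : PySem.Set (List Char) := PySem.Set.ofList (List.sublistsLen i.toNat u)
    let count := countComb comb 0
    if count ≠ 0 then count else solLoopA u rest

def solution (s : String) : Int :=
  solLoopA s.toList (PySem.List.pyRange (PySem.Str.len s) 1 (-1))

-- ===== PORT B =====
-- f(i, l, b) of Source B: number of distinct length-l subsequences of the suffix that, started at
-- balance b, never go negative and end at 0; the suffix s[i:] is passed directly as a list.
-- fBloop is the 'for j in range(i, n)' scan with its 'seen' set of already-handled characters.
mutual
def fB : Nat → List Char → Int → Int
  | 0, _, b => if b = 0 then 1 else 0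
  | l + 1, u, b => fBloop l u b PySem.Set.empty
termination_by l u _ => (l, u.length)

def fBloop : Nat → List Char → Int → PySem.Set Char → Int
  | _, [], _, _ => 0
  | l, c :: u, b, seen =>
    if PySem.Set.contains seen c then fBloop l u b seen
    else
      let nb := if c = '(' then b + 1 else b - 1
      (if 0 ≤ nb then fB l u nb else 0) + fBloop l u b (PySem.Set.add seen c)
termination_by l u _ _ => (l, u.length + 1)
end

-- 'for l in range(n, 1, -1): cnt = f(0, l, 0); if cnt: return cnt'
def solLoopB (u : List Char) : List Int → Int
  | [] => 0
  | l :: rest =>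
    let cnt := fB l.toNat u 0
    if cnt ≠ 0 then cnt else solLoopB u rest

def solution_alt (s : String) : Int :=
  solLoopB s.toList (PySem.List.pyRange (PySem.Str.len s) 1 (-1))

-- ===== PRECONDITION & SPEC =====
def Spec_solution (s : String) (out : Int) : Prop := out = solution_alt s
instance (s : String) (out : Int) : Decidable (Spec_solution s out) := by unfold Spec_solution; infer_instance

-- ===== CLAIM (what is proved, stated in full; the proofs are below) =====
def Claim_equal_solution : Prop := ∀ (s : String), Dom_solution s → Spec_solution s (solution s)

-- ===== LEMMAS AND PROOFS =====

-- the semantic count both programs compute per length: distinct length-l sublists t of u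
-- with checkAux b t (never-negative running balance from b, ending at 0)
def cnt (l : Nat) (u : List Char) (b : Int) : Nat :=
  ((List.sublistsLen l u).toFinset.filter (fun t => checkAux b t = true)).card

-- head of t is not in seen (vacuously true for [])
def headOK (seen : List Char) : List Char → Bool
  | [] => true
  | c :: _ => decide (c ∉ seen)

def cntS (l : Nat) (u : List Char) (b : Int) (seen : List Char) : Nat :=
  ((List.sublistsLen l u).toFinset.filter
    (fun t => checkAux b t = true ∧ headOK seen t = true)).card

theorem countComb_acc (xs : List (List Char)) (acc : Int) :
    countComb xs acc = acc + (xs.countP check : Int) := by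
  induction xs generalizing acc with
  | nil => simp [countComb]
  | cons x xs ih =>
    simp only [countComb, List.countP_cons]
    by_cases h : check x
    · simp [h, ih]; ring
    · simp [h, ih]

theorem countComb_ofList (zs : List (List Char)) :
    countComb (PySem.Set.ofList zs) 0 = ((zs.toFinset.filter (fun t => check t = true)).card : Int) := by
  rw [countComb_acc, zero_add]
  have hnd : (PySem.Set.ofList zs).Nodup := PySem.Set.nodup_ofList zs
  have h1 : (PySem.Set.ofList zs).countP check
      = ((PySem.Set.ofList zs).filter check).length := List.countP_eq_length_filter
  have h2 : ((PySem.Set.ofList zs).filter check).toFinset.card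
      = ((PySem.Set.ofList zs).filter check).length :=
    List.toFinset_card_of_nodup (hnd.filter check)
  have h3 : ((PySem.Set.ofList zs).filter check).toFinset
      = zs.toFinset.filter (fun t => check t = true) := by
    rw [List.toFinset_filter]
    congr 1
    ext t
    simp [PySem.Set.mem_ofList]
  rw [h1, ← h2, h3]

theorem mem_sublistsLen_toFinset (k : Nat) (w t : List Char) :
    t ∈ (List.sublistsLen k w).toFinset ↔ t.Sublist w ∧ t.length = k := by
  rw [List.mem_toFinset, List.mem_sublistsLen]

theorem headOK_nil (t : List Char) : headOK [] t = true := by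
  cases t <;> simp [headOK]

theorem fB_cnt : ∀ (l : Nat) (u : List Char) (b : Int), fB l u b = (cnt l u b : Int) := by
  intro l
  induction l with
  | zero =>
    intro u b
    simp [fB, cnt, List.sublistsLen_zero, checkAux, Finset.filter_singleton]
    by_cases h : b = 0 <;> simp [h]
  | succ l ih =>
    have loopLem : ∀ (u : List Char) (b : Int) (seen : PySem.Set Char),
        fBloop l u b seen = (cntS (l + 1) u b seen : Int) := by
      intro u
      induction u with
      | nil =>
        intro b seen
        simp [fBloop, cntS,
          List.sublistsLen_of_length_lt (show ([] : List Char).length < l + 1 by simp)]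
      | cons c u ihu =>
        intro b seen
        by_cases h : c ∈ seen
        · have h' : PySem.Set.contains seen c = true := by
            simpa [PySem.Set.contains] using h
          have hrw : fBloop l (c :: u) b seen = fBloop l u b seen := by
            simp only [fBloop]; rw [if_pos h']
          rw [hrw, ihu]
          congr 1
          unfold cntS
          congr 1
          apply Finset.ext
          intro t
          simp only [Finset.mem_filter, mem_sublistsLen_toFinset]
          constructor
          · rintro ⟨⟨hs, hl⟩, hc, hh⟩
            exact ⟨⟨hs.cons c, hl⟩, hc, hh⟩
          · rintro ⟨⟨hs, hl⟩, hc, hh⟩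
            refine ⟨⟨?_, hl⟩, hc, hh⟩
            rcases List.sublist_cons_iff.mp hs with h1 | ⟨r, rfl, hr⟩
            · exact h1
            · exfalso
              simp only [headOK, decide_eq_true_eq] at hh
              exact hh h
        · have h' : ¬ PySem.Set.contains seen c = true := by
            simpa [PySem.Set.contains] using h
          have hrw : fBloop l (c :: u) b seen
              = (if 0 ≤ (if c = '(' then b + 1 else b - 1)
                    then fB l u (if c = '(' then b + 1 else b - 1) else 0)
                + fBloop l u b (PySem.Set.add seen c) := by
            simp only [fBloop]; rw [if_neg h']
          rw [hrw, ihu, ih]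
          have hstep : ∀ t' : List Char, checkAux b (c :: t')
              = if (if c = '(' then b + 1 else b - 1) < 0 then false
                else checkAux (if c = '(' then b + 1 else b - 1) t' := by
            intro t'; simp [checkAux]
          have key : cntS (l + 1) (c :: u) b seen
              = (if 0 ≤ (if c = '(' then b + 1 else b - 1)
                    then cnt l u (if c = '(' then b + 1 else b - 1) else 0)
                + cntS (l + 1) u b (PySem.Set.add seen c) := by
            unfold cntS
            rw [← Finset.card_filter_add_card_filter_not
                  (s := (List.sublistsLen (l + 1) (c :: u)).toFinset.filter
                    (fun t => checkAux b t = true ∧ headOK seen t = true))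
                  (fun t : List Char => t.head? = some c),
                Finset.filter_filter, Finset.filter_filter]
            congr 1
            · -- head = c part
              by_cases hnb : 0 ≤ (if c = '(' then b + 1 else b - 1)
              · rw [if_pos hnb]
                rw [show ((List.sublistsLen (l + 1) (c :: u)).toFinset.filter
                      (fun t => (checkAux b t = true ∧ headOK seen t = true) ∧ t.head? = some c))
                    = Finset.image (List.cons c)
                        ((List.sublistsLen l u).toFinset.filter
                          (fun t => checkAux (if c = '(' then b + 1 else b - 1) t = true)) from ?_]
                · rw [Finset.card_image_of_injective _ List.cons_injective]; rfl
                · apply Finset.ext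
                  intro t
                  simp only [Finset.mem_filter, Finset.mem_image, mem_sublistsLen_toFinset]
                  constructor
                  · rintro ⟨⟨hs, hl⟩, ⟨hc, hh⟩, hhd⟩
                    cases t with
                    | nil => simp at hhd
                    | cons d t' =>
                      simp only [List.head?_cons, Option.some.injEq] at hhd
                      subst hhd
                      refine ⟨t', ⟨⟨List.cons_sublist_cons.mp hs, by simpa using hl⟩, ?_⟩, rfl⟩
                      rw [hstep t', if_neg (by omega)] at hc
                      exact hc
                  · rintro ⟨t', ⟨⟨hs, hl⟩, hc⟩, rfl⟩
                    refine ⟨⟨List.cons_sublist_cons.mpr hs, by simpa using hl⟩,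
                      ⟨?_, ?_⟩, rfl⟩
                    · rw [hstep t', if_neg (by omega)]; exact hc
                    · simpa [headOK] using h
              · rw [if_neg hnb]
                rw [show ((List.sublistsLen (l + 1) (c :: u)).toFinset.filter
                      (fun t => (checkAux b t = true ∧ headOK seen t = true) ∧ t.head? = some c))
                    = (∅ : Finset (List Char)) from ?_]
                · rfl
                · apply Finset.ext
                  intro t
                  simp only [Finset.mem_filter, Finset.notMem_empty, iff_false, not_and,
                    mem_sublistsLen_toFinset]
                  rintro ⟨hs, hl⟩ ⟨hc, hh⟩ hhd
                  cases t with
                  | nil => simp at hhd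
                  | cons d t' =>
                    simp only [List.head?_cons, Option.some.injEq] at hhd
                    subst hhd
                    rw [hstep t', if_pos (by omega)] at hc
                    simp at hc
            · -- head ≠ c part
              congr 1
              apply Finset.ext
              intro t
              simp only [Finset.mem_filter, mem_sublistsLen_toFinset]
              constructor
              · rintro ⟨⟨hs, hl⟩, ⟨hc, hh⟩, hhd⟩
                cases t with
                | nil => simp at hl
                | cons d t' =>
                  have hdc : d ≠ c := by
                    intro hdc; exact hhd (by simp [hdc])
                  have hdseen : d ∉ seen := by
                    simpa [headOK] using hh
                  refine ⟨⟨?_, hl⟩, hc, ?_⟩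
                  · rcases List.sublist_cons_iff.mp hs with h1 | ⟨r, heq, hr⟩
                    · exact h1
                    · exact absurd (by injection heq) hdc
                  · simp only [headOK, decide_eq_true_eq]
                    rw [PySem.Set.mem_add]
                    push Not
                    exact ⟨hdseen, hdc⟩
              · rintro ⟨⟨hs, hl⟩, hc, hh⟩
                cases t with
                | nil => simp at hl
                | cons d t' =>
                  simp only [headOK, decide_eq_true_eq, PySem.Set.mem_add] at hh
                  push Not at hh
                  refine ⟨⟨hs.cons c, hl⟩, ⟨hc, ?_⟩, ?_⟩
                  · simp only [headOK, decide_eq_true_eq]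
                    exact hh.1
                  · simpa using hh.2
          rw [key]
          push_cast
          split_ifs <;> ring
    intro u b
    have hfb : fB (l + 1) u b = fBloop l u b PySem.Set.empty := by simp only [fB]
    rw [hfb, loopLem]
    congr 1
    unfold cnt cntS
    congr 1
    apply Finset.filter_congr
    intro t _
    simp [headOK_nil, PySem.Set.empty]

theorem perLength (u : List Char) (i : Int) :
    countComb (PySem.Set.ofList (List.sublistsLen i.toNat u)) 0 = fB i.toNat u 0 := by
  rw [countComb_ofList, fB_cnt]
  unfold cnt check
  norm_num

theorem loops_eq (u : List Char) (r : List Int) : solLoopA u r = solLoopB u r := by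
  induction r with
  | nil => rfl
  | cons i rest ih => simp only [solLoopA, solLoopB, perLength, ih]

-- ===== VERDICT (by name: the statement is the Claim_ definition above) =====
theorem solution_spec : Claim_equal_solution := by
  intro s _
  unfold Spec_solution solution solution_alt
  exact loops_eq _ _
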